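-- pv_equiv track=rewrite | github.com/Jyoungjo/Algorithm_python | 백준/Gold/9935. 문자열 폭발/문자열 폭발.py | search_explosion_s
-- ===== SOURCE A (Python) =====
-- def search_explosion_s(string, explosion_string):
--     stack = []
--     ex_len = len(explosion_string)
--
--     for i in range(len(string)):
--         stack.append(string[i])
--         if ''.join(stack[-ex_len:]) == explosion_string:
--             for _ in range(ex_len):
--                 stack.pop()
--
--     return stack
-- ===== SOURCE B (Python) =====
-- def search_explosion_s(string, explosion_string):
--     m = len(explosion_string)
--     if m == 0:
--         return list(string)
--     # failure table: fail[i] = length of longest proper border of explosion_string[:i+1]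
--     fail = [0]
--     k = 0
--     for i in range(1, m):
--         while k and explosion_string[i] != explosion_string[k]:
--             k = fail[k - 1]
--         if explosion_string[i] == explosion_string[k]:
--             k += 1
--         fail.append(k)
--     # stack of (char, automaton state after pushing that char)
--     stack = []
--     for c in string:
--         q = stack[-1][1] if stack else 0
--         while q and explosion_string[q] != c:
--             q = fail[q - 1]
--         if explosion_string[q] == c:
--             q += 1
--         stack.append((c, q))
--         if q == m:
--             del stack[-m:]
--     return [c for c, _ in stack]
-- ===== Notes on version B (the rewrite author's own statement) =====
-- stated objective: faster
-- what changed: Replaces A's per-character slice+join suffix comparison (O(m) work per pushed character) by a KMP automaton: a precomputed failure table and a stack of (char, state) pairs, giving amortized O(1) work per character.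
import Mathlib
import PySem

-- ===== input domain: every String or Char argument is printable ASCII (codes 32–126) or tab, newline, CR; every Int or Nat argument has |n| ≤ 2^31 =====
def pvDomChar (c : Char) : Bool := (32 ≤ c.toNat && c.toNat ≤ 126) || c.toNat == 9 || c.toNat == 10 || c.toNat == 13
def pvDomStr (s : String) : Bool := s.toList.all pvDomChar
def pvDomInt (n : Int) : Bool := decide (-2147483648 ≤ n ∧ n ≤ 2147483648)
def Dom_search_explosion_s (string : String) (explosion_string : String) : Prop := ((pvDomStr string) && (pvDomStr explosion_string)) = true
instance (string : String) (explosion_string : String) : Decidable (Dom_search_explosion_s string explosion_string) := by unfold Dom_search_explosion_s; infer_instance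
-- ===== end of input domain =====

-- B replaces A's per-character slice+join suffix comparison (O(m) per pushed character)
-- by a KMP failure table and a stack of (char, automaton state) pairs: objective 'faster'
-- (confirmed); return values proved identical on all inputs.

-- ===== PORT A =====
-- A's stack of one-character strings is represented as a List Char; the final return maps
-- each stacked character back to a one-character String.
def search_explosion_s (string : String) (explosion_string : String) : List String :=
  let w : List Char := explosion_string.toList
  let ex_len : Nat := w.length
  let cs : List Char := string.toList
  let stack : List Char :=
    (PySem.List.pyRange 0 cs.length 1).foldl
      (fun stack i =>
        let stack := stack ++ [PySem.List.pyGetD cs i ' ']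
        if PySem.Chars.join [] ((PySem.List.slice stack (some (-(ex_len : Int))) none).map (fun ch => [ch])) = w then
          (PySem.List.pyRange 0 ex_len 1).foldl (fun s _ => s.dropLast) stack
        else stack) []
  stack.map (fun c => String.singleton c)

-- ===== PORT B =====
-- the 'while q and explosion_string[q] != c: q = fail[q-1]' loop; fuel bounds the number of
-- iterations (the loop strictly decreases q once fail[j] ≤ j, proved below), fuel = q suffices
def kmpDescend (w : List Char) (fail : List Nat) (c : Char) : Nat → Nat → Nat
  | 0, q => q
  | fuel + 1, q => if q ≠ 0 ∧ w.getD q ' ' ≠ c then kmpDescend w fail c fuel (fail.getD (q - 1) 0) else q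

-- 'while … ; if explosion_string[q] == c: q += 1'
def kmpStep (w : List Char) (fail : List Nat) (c : Char) (q : Nat) : Nat :=
  let q' := kmpDescend w fail c q q
  if w.getD q' ' ' = c then q' + 1 else q'

-- 'fail = [0]; k = 0; for i in range(1, m): … fail.append(k)'
def buildFail (w : List Char) : List Nat :=
  ((PySem.List.pyRange 1 w.length 1).foldl
    (fun st i =>
      let k := kmpStep w st.1 (PySem.List.pyGetD w i ' ') st.2
      (st.1 ++ [k], k)) ([0], 0)).1

def search_explosion_s_alt (string : String) (explosion_string : String) : List String :=
  let w : List Char := explosion_string.toList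
  let m : Nat := w.length
  if m = 0 then string.toList.map (fun c => String.singleton c)
  else
    let fail := buildFail w
    let stack : List (Char × Nat) :=
      string.toList.foldl
        (fun stack c =>
          let q0 : Nat := match stack.getLast? with | some p => p.2 | none => 0
          let q := kmpStep w fail c q0
          let stack := stack ++ [(c, q)]
          if q = m then stack.take (stack.length - m) else stack) []
    stack.map (fun p => String.singleton p.1)

-- ===== PRECONDITION & SPEC =====
def Spec_search_explosion_s (string : String) (explosion_string : String) (out : List String) : Prop := out = search_explosion_s_alt string explosion_string
instance (string : String) (explosion_string : String) (out : List String) : Decidable (Spec_search_explosion_s string explosion_string out) := by unfold Spec_search_explosion_s; infer_instance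

-- ===== CLAIM (what is proved, stated in full; the proofs are below) =====
def Claim_equal_search_explosion_s : Prop := ∀ (string : String) (explosion_string : String), Dom_search_explosion_s string explosion_string → Spec_search_explosion_s string explosion_string (search_explosion_s string explosion_string)

-- ===== LEMMAS AND PROOFS =====


-- `lam w s` = length of the longest prefix of w that is a suffix of s (capped at w.length)
def lam (w s : List Char) : Nat := Nat.findGreatest (fun k => w.take k <:+ s) w.length

-- `brd w j` = length of the longest proper border of w.take j
def brd (w : List Char) (j : Nat) : Nat := Nat.findGreatest (fun k => w.take k <:+ w.take j) (j - 1)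

-- result of one full automaton transition evaluated with explicit fuel
def kmpAfter (w : List Char) (fail : List Nat) (c : Char) (fuel q : Nat) : Nat :=
  let q' := kmpDescend w fail c fuel q
  if w.getD q' ' ' = c then q' + 1 else q'

theorem kmpStep_eq_after (w : List Char) (fail : List Nat) (c : Char) (q : Nat) :
    kmpStep w fail c q = kmpAfter w fail c q q := rfl

theorem suffix_of_suffix_le {a b s : List Char} (ha : a <:+ s) (hb : b <:+ s)
    (h : a.length ≤ b.length) : a <:+ b := by
  have hbs : b.length ≤ s.length := hb.length_le
  have h1 := List.suffix_iff_eq_drop.mp ha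
  have h2 := List.suffix_iff_eq_drop.mp hb
  have hsplit : s.length - a.length = (s.length - b.length) + (b.length - a.length) := by omega
  rw [h1, hsplit, ← List.drop_drop, ← h2]
  exact List.drop_suffix _ _

theorem suffix_snoc_cancel {x s : List Char} {c : Char} :
    x ++ [c] <:+ s ++ [c] ↔ x <:+ s := by
  constructor
  · rintro ⟨t, ht⟩
    refine ⟨t, ?_⟩
    have h2 := congrArg List.dropLast ht
    simpa [← List.append_assoc] using h2
  · rintro ⟨t, ht⟩
    exact ⟨t, by rw [← List.append_assoc, ht]⟩

theorem take_succ_eq {w : List Char} {k : Nat} (h : k < w.length) :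
    w.take (k + 1) = w.take k ++ [w[k]] := by
  rw [List.take_add_one]
  simp [List.getElem?_eq_getElem h]

theorem border_succ_iff {w s : List Char} {k : Nat} {c : Char} (hk : k < w.length) :
    w.take (k + 1) <:+ s ++ [c] ↔ (w.take k <:+ s ∧ w[k] = c) := by
  rw [take_succ_eq hk]
  constructor
  · intro h
    obtain ⟨t, ht⟩ := h
    have hc : w[k] = c := by
      have h1 : (some w[k] : Option Char) = some c := by
        have e1 : ((t ++ w.take k) ++ [w[k]]).getLast? = some w[k] := List.getLast?_concat
        have e2 : (s ++ [c]).getLast? = some c := List.getLast?_concat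
        rw [← e1, List.append_assoc, ht, e2]
      exact Option.some.inj h1
    refine ⟨?_, hc⟩
    rw [hc] at ht
    exact suffix_snoc_cancel.mp ⟨t, ht⟩
  · rintro ⟨h1, h2⟩
    rw [h2]
    exact suffix_snoc_cancel.mpr h1

theorem lam_le (w s : List Char) : lam w s ≤ w.length := Nat.findGreatest_le _

theorem lam_suffix (w s : List Char) : w.take (lam w s) <:+ s := by
  unfold lam
  exact Nat.findGreatest_spec (P := fun k => w.take k <:+ s) (Nat.zero_le _)
    (by show List.take 0 w <:+ s; rw [List.take_zero]; exact ⟨s, by simp⟩)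

theorem le_lam {w s : List Char} {k : Nat} (hk : k ≤ w.length) (h : w.take k <:+ s) :
    k ≤ lam w s := Nat.le_findGreatest hk h

theorem lam_nil {w : List Char} (hw : 0 < w.length) : lam w [] = 0 := by
  apply Nat.findGreatest_eq_zero_iff.mpr
  intro n hn _ hsuf
  have h0 := List.suffix_nil.mp hsuf
  rw [List.take_eq_nil_iff] at h0
  rcases h0 with h | h
  · omega
  · simp [h] at hw

theorem brd_le (w : List Char) (j : Nat) : brd w j ≤ j - 1 := Nat.findGreatest_le _

theorem brd_suffix (w : List Char) (j : Nat) : w.take (brd w j) <:+ w.take j := by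
  unfold brd
  exact Nat.findGreatest_spec (P := fun k => w.take k <:+ w.take j) (Nat.zero_le _)
    (by show List.take 0 w <:+ List.take j w; rw [List.take_zero]; exact ⟨w.take j, by simp⟩)

theorem le_brd {w : List Char} {j k : Nat} (hk : k ≤ j - 1) (h : w.take k <:+ w.take j) :
    k ≤ brd w j := Nat.le_findGreatest hk h

-- the state after the automaton exits its while loop, for an exit state q
theorem after_exit {w s : List Char} {c : Char} {q : Nat}
    (hq : q < w.length) (hsuf : w.take q <:+ s)
    (hexit : q = 0 ∨ w.getD q ' ' = c) :
    (if w.getD q ' ' = c then q + 1 else q) ≤ q + 1 ∧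
    (if w.getD q ' ' = c then q + 1 else q) ≤ w.length ∧
    w.take (if w.getD q ' ' = c then q + 1 else q) <:+ s ++ [c] ∧
    (∀ k, k ≤ w.length → w.take k <:+ s ++ [c] → k ≤ q + 1 →
      k ≤ (if w.getD q ' ' = c then q + 1 else q)) := by
  have hgetD : w.getD q ' ' = w[q] := List.getD_eq_getElem w ' ' hq
  by_cases hc : w.getD q ' ' = c
  · simp only [if_pos hc]
    refine ⟨le_rfl, by omega, ?_, fun k _ _ hk => hk⟩
    rw [border_succ_iff hq]
    exact ⟨hsuf, by rw [← hgetD, hc]⟩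
  · have hq0 : q = 0 := by
      rcases hexit with h | h
      · exact h
      · exact absurd h hc
    subst hq0
    simp only [if_neg hc]
    refine ⟨by omega, by omega, by simp, ?_⟩
    intro k hkm hks hkq
    rcases Nat.lt_or_ge k 1 with h | h
    · omega
    · have hkq1 : k = 1 := by omega
      subst hkq1
      rw [show (1 : Nat) = 0 + 1 by rfl, border_succ_iff hq] at hks
      exact absurd (hgetD.trans hks.2) hc

-- the core lemma about the automaton transition: from any state q that is a border of s,
-- the transition lands on the greatest border of s ++ [c] not exceeding q + 1
theorem descend_out (w : List Char) (fail : List Nat) (c : Char) (s : List Char) :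
    ∀ fuel q, q ≤ fuel → q < w.length →
      (∀ j, j < q → fail.getD j 0 = brd w (j + 1)) →
      w.take q <:+ s →
      kmpAfter w fail c fuel q ≤ q + 1 ∧
      kmpAfter w fail c fuel q ≤ w.length ∧
      w.take (kmpAfter w fail c fuel q) <:+ s ++ [c] ∧
      (∀ k, k ≤ w.length → w.take k <:+ s ++ [c] → k ≤ q + 1 →
        k ≤ kmpAfter w fail c fuel q) := by
  intro fuel
  induction fuel with
  | zero =>
    intro q hle hq hfail hsuf
    have hq0 : q = 0 := by omega
    subst hq0
    have := after_exit (s := s) (c := c) hq hsuf (Or.inl rfl)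
    simpa [kmpAfter, kmpDescend] using this
  | succ fuel ih =>
    intro q hle hq hfail hsuf
    by_cases hcond : q ≠ 0 ∧ w.getD q ' ' ≠ c
    · -- descent step
      have hdesc : kmpAfter w fail c (fuel + 1) q =
          kmpAfter w fail c fuel (fail.getD (q - 1) 0) := by
        simp only [kmpAfter, kmpDescend, if_pos hcond]
      have hfq : fail.getD (q - 1) 0 = brd w q := by
        have := hfail (q - 1) (by omega)
        rwa [Nat.sub_add_cancel (by omega)] at this
      set q1 := brd w q with hq1def
      have hq1lt : q1 < q := by have := brd_le w q; omega
      have hsuf1 : w.take q1 <:+ s := (brd_suffix w q).trans hsuf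
      have hmain := ih q1 (by omega) (by omega)
        (fun j hj => hfail j (by omega)) hsuf1
      rw [hdesc, hfq]
      obtain ⟨h1, h2, h3, h4⟩ := hmain
      refine ⟨by omega, h2, h3, ?_⟩
      intro k hkm hks hkq
      apply h4 k hkm hks
      -- show k ≤ q1 + 1
      match k with
      | 0 => omega
      | j + 1 =>
        have hjm : j < w.length := by omega
        rw [border_succ_iff hjm] at hks
        obtain ⟨hjs, hjc⟩ := hks
        have hgetD : w.getD q ' ' = w[q] := List.getD_eq_getElem w ' ' hq
        have hjne : j ≠ q := by
          intro heq; subst heq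
          exact hcond.2 (hgetD.trans hjc)
        have hjq : j ≤ q - 1 := by omega
        have hjtake : w.take j <:+ w.take q := by
          apply suffix_of_suffix_le hjs hsuf
          simp [List.length_take]
          omega
        have := le_brd hjq hjtake
        omega
    · -- loop exits at q
      have hdesc : kmpAfter w fail c (fuel + 1) q =
          (if w.getD q ' ' = c then q + 1 else q) := by
        simp only [kmpAfter, kmpDescend, if_neg hcond]
      rw [hdesc]
      have hexit : q = 0 ∨ w.getD q ' ' = c := by
        by_cases h0 : q = 0
        · exact Or.inl h0
        · right; by_contra hcc; exact hcond ⟨h0, hcc⟩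
      exact after_exit hq hsuf hexit

-- when started from the exact longest-border state, the transition computes lam (s ++ [c])
theorem kmpStep_lam {w : List Char} {fail : List Nat} {c : Char} {s : List Char}
    (hfail : ∀ j, j < w.length → fail.getD j 0 = brd w (j + 1))
    (hq : lam w s < w.length) :
    kmpStep w fail c (lam w s) = lam w (s ++ [c]) := by
  rw [kmpStep_eq_after]
  obtain ⟨h1, h2, h3, h4⟩ := descend_out w fail c s (lam w s) (lam w s) le_rfl hq
    (fun j hj => hfail j (by omega)) (lam_suffix w s)
  apply le_antisymm
  · exact le_lam h2 h3
  · apply h4 _ (lam_le w _) (lam_suffix w _)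
    -- lam w (s ++ [c]) ≤ lam w s + 1
    rcases Nat.eq_zero_or_pos (lam w (s ++ [c])) with h0 | hpos
    · omega
    · obtain ⟨j, hj⟩ : ∃ j, lam w (s ++ [c]) = j + 1 := ⟨lam w (s ++ [c]) - 1, by omega⟩
      rw [hj]
      have hjm : j < w.length := by have := lam_le w (s ++ [c]); omega
      have hsufj := lam_suffix w (s ++ [c])
      rw [hj, border_succ_iff hjm] at hsufj
      have := le_lam (k := j) (by omega) hsufj.1
      omega


-- the fail-building fold of port B, with an arbitrary right end
def failFold (w : List Char) (i : Int) : List Nat × Nat :=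
  (PySem.List.pyRange 1 i 1).foldl
    (fun st ii =>
      let k := kmpStep w st.1 (PySem.List.pyGetD w ii ' ') st.2
      (st.1 ++ [k], k)) ([0], 0)

theorem getD_append_lt {l : List Nat} {x : Nat} {j : Nat} {d : Nat} (h : j < l.length) :
    (l ++ [x]).getD j d = l.getD j d := by
  simp [List.getD, List.getElem?_append_left h]

theorem getD_append_len {l : List Nat} {x : Nat} {d : Nat} :
    (l ++ [x]).getD l.length d = x := by
  simp [List.getD]

theorem getD_append_at {l : List Nat} {x : Nat} {d : Nat} {j : Nat} (h : j = l.length) :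
    (l ++ [x]).getD j d = x := by
  subst h; exact getD_append_len

theorem fail_inv (w : List Char) :
    ∀ i : Nat, 1 ≤ i → i ≤ w.length →
      (failFold w (i : Int)).1.length = i ∧
      (∀ j, j < i → (failFold w (i : Int)).1.getD j 0 = brd w (j + 1)) ∧
      (failFold w (i : Int)).2 = brd w i := by
  intro i h1
  induction i, h1 using Nat.le_induction with
  | base =>
    intro _
    have hnil : PySem.List.pyRange 1 (1 : Int) 1 = [] :=
      PySem.List.pyRange_one_eq_nil le_rfl
    have hbrd : brd w 1 = 0 := by simp [brd]
    refine ⟨by simp [failFold, hnil], ?_, by simp [failFold, hnil, hbrd]⟩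
    intro j hj
    have hj0 : j = 0 := by omega
    subst hj0
    simp [failFold, hnil, hbrd]
  | succ i hi ih =>
    intro hlen
    have hiw : i < w.length := by omega
    obtain ⟨hl, hspec, hk⟩ := ih (by omega)
    have hcast : ((i + 1 : Nat) : Int) = (i : Int) + 1 := by push_cast; ring
    have hstep : failFold w ((i + 1 : Nat) : Int) =
        (let k := kmpStep w (failFold w (i : Int)).1
            (PySem.List.pyGetD w (i : Int) ' ') (failFold w (i : Int)).2
         ((failFold w (i : Int)).1 ++ [k], k)) := by
      rw [show failFold w ((i + 1 : Nat) : Int) = failFold w ((i : Int) + 1) by rw [hcast]]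
      unfold failFold
      rw [PySem.List.pyRange_one_succ_right (by exact_mod_cast hi)]
      rw [List.foldl_append]
      simp
    have hgetw : PySem.List.pyGetD w (i : Int) ' ' = w[i] := by
      rw [PySem.List.pyGetD_natCast]
      exact List.getD_eq_getElem w ' ' hiw
    set st := failFold w (i : Int) with hst
    have hq : st.2 = brd w i := hk
    have hqlt : st.2 < w.length := by
      rw [hq]; have := brd_le w i; omega
    have hfail' : ∀ j, j < st.2 → st.1.getD j 0 = brd w (j + 1) := by
      intro j hj
      apply hspec
      rw [hq] at hj
      have := brd_le w i; omega
    have hsuf : w.take st.2 <:+ w.take i := by rw [hq]; exact brd_suffix w i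
    obtain ⟨h1, h2, h3, h4⟩ := descend_out w st.1 w[i] (w.take i) st.2 st.2 le_rfl
      hqlt hfail' hsuf
    rw [hq] at h1 h2 h3 h4
    have htake : w.take i ++ [w[i]] = w.take (i + 1) := (take_succ_eq hiw).symm
    have hr : kmpStep w st.1 w[i] st.2 = brd w (i + 1) := by
      rw [kmpStep_eq_after, hq]
      apply le_antisymm
      · apply le_brd
        · have hb := brd_le w i; omega
        · rw [← htake]; exact h3
      · apply h4
        · have := brd_le w (i + 1); omega
        · have hb := brd_suffix w (i + 1); rw [← htake] at hb; exact hb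
        · rcases Nat.eq_zero_or_pos (brd w (i + 1)) with h0 | hpos
          · omega
          · obtain ⟨j, hj⟩ : ∃ j, brd w (i + 1) = j + 1 :=
              ⟨brd w (i + 1) - 1, by omega⟩
            have hble := brd_le w (i + 1)
            have hjw : j < w.length := by omega
            have hbsuf := brd_suffix w (i + 1)
            rw [hj, ← htake, border_succ_iff hjw] at hbsuf
            have hjle : j ≤ brd w i := le_brd (by omega) hbsuf.1
            omega
    have hstep1 : (failFold w ((i + 1 : Nat) : Int)).1 =
        st.1 ++ [kmpStep w st.1 w[i] st.2] := by
      rw [hstep]; simp [hgetw]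
    have hstep2 : (failFold w ((i + 1 : Nat) : Int)).2 =
        kmpStep w st.1 w[i] st.2 := by
      rw [hstep]; simp [hgetw]
    refine ⟨?_, ?_, ?_⟩
    · rw [hstep1]; simp [hl]
    · intro j hj
      rw [hstep1]
      rcases Nat.lt_or_ge j i with hji | hji
      · rw [getD_append_lt (by rw [hl]; exact hji)]
        exact hspec j hji
      · have hji' : j = i := by omega
        rw [getD_append_at (by rw [hl]; omega), hr, hji']
    · rw [hstep2, hr]

-- A's condition ''.join(stack[-len(w):]) == w is exactly "w is a suffix of the stack"
theorem joinCond (w t : List Char) (hm : 0 < w.length) :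
    (PySem.Chars.join [] ((PySem.List.slice t (some (-(w.length : Int))) none).map
      (fun ch => [ch])) = w) ↔ w <:+ t := by
  rw [show PySem.List.slice t (some (-(w.length : Int))) none =
      t.drop (t.length - w.length) from PySem.List.slice_from_neg_natCast t w.length hm,
    PySem.Chars.join_nil_singletons]
  constructor
  · intro h; rw [← h]; exact List.drop_suffix _ _
  · rintro ⟨u, rfl⟩
    have hlen : (u ++ w).length - w.length = u.length := by simp
    rw [hlen, List.drop_left]

-- A's pop loop removes the last m elements
theorem popFold (m : Nat) (t : List Char) :
    (PySem.List.pyRange 0 (m : Int) 1).foldl (fun s _ => s.dropLast) t =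
      t.take (t.length - m) := by
  induction m with
  | zero =>
    rw [PySem.List.pyRange_one_eq_nil (by norm_num)]
    simp
  | succ m ih =>
    have hcast : ((m + 1 : Nat) : Int) = (m : Int) + 1 := by push_cast; ring
    rw [hcast, PySem.List.pyRange_one_succ_right (by exact_mod_cast Nat.zero_le m),
      List.foldl_append]
    simp only [List.foldl_cons, List.foldl_nil]
    rw [ih, List.dropLast_eq_take, List.take_take, List.length_take]
    congr 1
    omega

-- invariant of B's stack: each stored state is the longest-border state of the
-- character stack up to that position, and is < w.length
def goodB (w : List Char) (l : List (Char × Nat)) : Prop :=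
  ∀ i, (h : i < l.length) → (l[i]).2 = lam w ((l.take (i + 1)).map Prod.fst) ∧
    (l[i]).2 < w.length

theorem goodB_nil (w : List Char) : goodB w [] := by
  intro i h; simp at h

theorem goodB_take {w : List Char} {l : List (Char × Nat)} (hg : goodB w l) (n : Nat) :
    goodB w (l.take n) := by
  intro i h
  have h' : i < min n l.length := by simpa [List.length_take] using h
  have hi : i < l.length := by omega
  have hin : i < n := by omega
  have he : (l.take n)[i] = l[i] := List.getElem_take
  have ht : (l.take n).take (i + 1) = l.take (i + 1) := by
    rw [List.take_take]; congr 1; omega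
  rw [he, ht]
  exact hg i hi

-- value and bound of B's q0 = (stack[-1][1] if stack else 0)
theorem q0_spec {w : List Char} (hm : 0 < w.length) {l : List (Char × Nat)}
    (hg : goodB w l) :
    (match l.getLast? with | some p => p.2 | none => 0) = lam w (l.map Prod.fst) ∧
    (match l.getLast? with | some p => p.2 | none => 0) < w.length := by
  cases hl : l.getLast? with
  | none =>
    have h0 : l = [] := List.getLast?_eq_none_iff.mp hl
    subst h0
    simp [lam_nil hm, hm]
  | some p =>
    have hne : l ≠ [] := by intro h; subst h; simp at hl
    have hpos : 0 < l.length := List.length_pos_of_ne_nil hne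
    have hget : l.getLast? = some l[l.length - 1] := by
      rw [List.getLast?_eq_getElem?, List.getElem?_eq_getElem (by omega)]
    rw [hl] at hget
    have hp : p = l[l.length - 1] := by injection hget
    obtain ⟨h1, h2⟩ := hg (l.length - 1) (by omega)
    rw [Nat.sub_add_cancel hpos, List.take_length] at h1
    subst hp
    exact ⟨h1, h2⟩

-- one step of A's loop (over the char stack)
def stepA (w : List Char) (stack : List Char) (c : Char) : List Char :=
  let stack := stack ++ [c]
  if PySem.Chars.join [] ((PySem.List.slice stack (some (-(w.length : Int))) none).map
      (fun ch => [ch])) = w then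
    (PySem.List.pyRange 0 (w.length : Int) 1).foldl (fun s _ => s.dropLast) stack
  else stack

-- one step of B's loop (over the (char, state) stack)
def stepB (w : List Char) (fail : List Nat) (stack : List (Char × Nat)) (c : Char) :
    List (Char × Nat) :=
  let q0 : Nat := match stack.getLast? with | some p => p.2 | none => 0
  let q := kmpStep w fail c q0
  let stack := stack ++ [(c, q)]
  if q = w.length then stack.take (stack.length - w.length) else stack

theorem step_sim {w : List Char} {fail : List Nat} (hm : 0 < w.length)
    (hfail : ∀ j, j < w.length → fail.getD j 0 = brd w (j + 1))
    (c : Char) (l : List (Char × Nat)) (hg : goodB w l) :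
    stepA w (l.map Prod.fst) c = (stepB w fail l c).map Prod.fst ∧
    goodB w (stepB w fail l c) := by
  obtain ⟨hq0, hq0lt⟩ := q0_spec hm hg
  have hlam : lam w (l.map Prod.fst) < w.length := hq0 ▸ hq0lt
  have hq : kmpStep w fail c (match l.getLast? with | some p => p.2 | none => 0) =
      lam w (l.map Prod.fst ++ [c]) := by
    rw [hq0]; exact kmpStep_lam hfail hlam
  set sA := l.map Prod.fst with hsA
  set q := lam w (sA ++ [c]) with hqdef
  have hcond : (PySem.Chars.join []
      ((PySem.List.slice (sA ++ [c]) (some (-(w.length : Int))) none).map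
        (fun ch => [ch])) = w) ↔ (q = w.length) := by
    rw [joinCond _ _ hm]
    constructor
    · intro h
      exact le_antisymm (lam_le _ _) (le_lam le_rfl (by rwa [List.take_length]))
    · intro h
      have hs := lam_suffix w (sA ++ [c])
      rw [← hqdef, h, List.take_length] at hs
      exact hs
  simp only [stepA, stepB]
  rw [hq]
  by_cases hqm : q = w.length
  · rw [if_pos (hcond.mpr hqm), if_pos hqm]
    have hlen : (l ++ [(c, q)]).length - w.length = l.length + 1 - w.length := by simp
    have hlenA : (sA ++ [c]).length - w.length = l.length + 1 - w.length := by
      simp [hsA]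
    have hnle : l.length + 1 - w.length ≤ l.length := by omega
    have htk : (l ++ [(c, q)]).take (l.length + 1 - w.length) =
        l.take (l.length + 1 - w.length) :=
      List.take_append_of_le_length hnle
    constructor
    · rw [popFold, hlen, hlenA, htk, List.map_take,
        List.take_append_of_le_length (by rw [hsA, List.length_map]; exact hnle), ← hsA]
    · rw [hlen, htk]
      exact goodB_take hg _
  · rw [if_neg (fun h => hqm (hcond.mp h)), if_neg hqm]
    have hmapA : (l ++ [(c, q)]).map Prod.fst = sA ++ [c] := by simp [hsA]
    refine ⟨hmapA.symm, ?_⟩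
    intro i h
    have hil : i < l.length + 1 := by simpa using h
    rcases Nat.lt_or_ge i l.length with hi | hi
    · have he : (l ++ [(c, q)])[i] = l[i] := List.getElem_append_left hi
      have ht : (l ++ [(c, q)]).take (i + 1) = l.take (i + 1) :=
        List.take_append_of_le_length (by omega)
      rw [he, ht]
      exact hg i hi
    · have hieq : i = l.length := by omega
      subst hieq
      have he : (l ++ [(c, q)])[l.length]'(by simp) = (c, q) :=
        List.getElem_concat_length rfl (by simp)
      have ht : (l ++ [(c, q)]).take (l.length + 1) = l ++ [(c, q)] :=
        List.take_of_length_le (by simp)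
      rw [he, ht, hmapA]
      exact ⟨rfl, lt_of_le_of_ne (hqdef ▸ lam_le w (sA ++ [c])) hqm⟩

theorem fold_sim {w : List Char} {fail : List Nat} (hm : 0 < w.length)
    (hfail : ∀ j, j < w.length → fail.getD j 0 = brd w (j + 1)) :
    ∀ (cs : List Char) (l : List (Char × Nat)), goodB w l →
      cs.foldl (stepA w) (l.map Prod.fst) = (cs.foldl (stepB w fail) l).map Prod.fst ∧
      goodB w (cs.foldl (stepB w fail) l) := by
  intro cs
  induction cs with
  | nil => intro l hg; exact ⟨rfl, hg⟩
  | cons c cs ih =>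
    intro l hg
    simp only [List.foldl_cons]
    obtain ⟨h1, h2⟩ := step_sim hm hfail c l hg
    rw [h1]
    exact ih _ h2

-- in the degenerate case w = [] the branch of A never removes anything
theorem stepA_nil (s : List Char) (c : Char) : stepA [] s c = s ++ [c] := by
  unfold stepA
  simp

theorem foldl_snoc (cs : List Char) :
    ∀ a : List Char, cs.foldl (fun s c => s ++ [c]) a = a ++ cs := by
  induction cs with
  | nil => intro a; simp
  | cons c cs ih => intro a; simp [ih, List.append_assoc]

theorem foldl_stepA_nil (cs : List Char) (a : List Char) :
    cs.foldl (stepA ([] : List Char)) a = a ++ cs := by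
  rw [show stepA ([] : List Char) = (fun s c => s ++ [c]) from
    funext fun s => funext fun c => stepA_nil s c]
  exact foldl_snoc cs a

-- ===== VERDICT (by name: the statement is the Claim_ definition above) =====
theorem search_explosion_s_spec : Claim_equal_search_explosion_s := by
  intro string explosion_string _
  unfold Spec_search_explosion_s
  have hA : search_explosion_s string explosion_string =
      (string.toList.foldl (stepA explosion_string.toList) []).map
        (fun c => String.singleton c) := by
    show ((PySem.List.pyRange 0 ((string.toList.length : Nat) : Int) 1).foldl
        (fun stack i => stepA explosion_string.toList stack
          (PySem.List.pyGetD string.toList i ' ')) []).map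
        (fun c => String.singleton c) = _
    rw [PySem.List.foldl_pyRange_zero_pyGetD' string.toList ' '
      (stepA explosion_string.toList) []]
  by_cases hm : explosion_string.toList.length = 0
  · have hw : explosion_string.toList = [] := List.length_eq_zero_iff.mp hm
    have hB : search_explosion_s_alt string explosion_string =
        string.toList.map (fun c => String.singleton c) := by
      simp only [search_explosion_s_alt]
      rw [if_pos hm]
    rw [hA, hB, hw, foldl_stepA_nil, List.nil_append]
  · have hm' : 0 < explosion_string.toList.length := Nat.pos_of_ne_zero hm
    have hfail : ∀ j, j < explosion_string.toList.length →
        (buildFail explosion_string.toList).getD j 0 =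
          brd explosion_string.toList (j + 1) := by
      intro j hj
      exact (fail_inv explosion_string.toList explosion_string.toList.length
        (by omega) le_rfl).2.1 j hj
    obtain ⟨hAB, _⟩ := fold_sim hm' hfail string.toList [] (goodB_nil _)
    simp only [List.map_nil] at hAB
    have hB : search_explosion_s_alt string explosion_string =
        (string.toList.foldl
          (stepB explosion_string.toList (buildFail explosion_string.toList)) []).map
          (fun p => String.singleton p.1) := by
      simp only [search_explosion_s_alt]
      rw [if_neg hm]
      rfl
    rw [hA, hB, hAB, List.map_map]
    rfl
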